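-- pv_equiv track=rewrite | github.com/kadiksi/booker | services/word_chunks.py | _merge_whole_paragraphs
-- ===== SOURCE A (Python) =====
-- def _merge_whole_paragraphs(
--     segments: list[tuple[str, bool]],
--     max_len: int,
-- ) -> list[tuple[str, bool]]:
--     """
--     Склеивает целые абзацы (True) через \\n\\n, пока длина ≤ max_len.
--     Куски длинного абзаца (False) всегда отдельным сообщением.
--     """
--     out: list[tuple[str, bool]] = []
--     buf: str | None = None
--
--     for seg, whole in segments:
--         if not whole:
--             if buf is not None:
--                 out.append((buf, True))
--                 buf = None
--             out.append((seg, False))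
--             continue
--         if buf is None:
--             buf = seg
--         else:
--             cand = buf + "\n\n" + seg
--             if len(cand) <= max_len:
--                 buf = cand
--             else:
--                 out.append((buf, True))
--                 buf = seg
--     if buf is not None:
--         out.append((buf, True))
--     return out
-- ===== SOURCE B (Python) =====
-- def _split_items(segments):
--     """First pass: runs of consecutive whole paragraphs (as lists of strings),
--     with each non-whole segment kept standalone (as a bare string), in order."""
--     items = []
--     run = []
--     for seg, whole in segments:
--         if whole:
--             run.append(seg)
--         else:
--             if run:
--                 items.append(run)
--                 run = []
--             items.append(seg)
--     if run:
--         items.append(run)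
--     return items
--
--
-- def _pack(run, max_len):
--     """Greedily pack one run of whole paragraphs into chunks of length <= max_len."""
--     chunks = []
--     buf = run[0]
--     for s in run[1:]:
--         cand = buf + "\n\n" + s
--         if len(cand) <= max_len:
--             buf = cand
--         else:
--             chunks.append((buf, True))
--             buf = s
--     chunks.append((buf, True))
--     return chunks
--
--
-- def _merge_whole_paragraphs(segments, max_len):
--     out = []
--     for item in _split_items(segments):
--         if isinstance(item, list):
--             out.extend(_pack(item, max_len))
--         else:
--             out.append((item, False))
--     return out
-- ===== Notes on version B (the rewrite author's own statement) =====
-- stated objective: alternative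
-- what changed: A's single stateful loop (Optional buffer threaded across all segments) is re-decomposed into two passes: first split the segments into runs of consecutive whole paragraphs and standalone boundary segments, then pack each run independently with a greedy helper and concatenate the pieces in order.
import Mathlib
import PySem

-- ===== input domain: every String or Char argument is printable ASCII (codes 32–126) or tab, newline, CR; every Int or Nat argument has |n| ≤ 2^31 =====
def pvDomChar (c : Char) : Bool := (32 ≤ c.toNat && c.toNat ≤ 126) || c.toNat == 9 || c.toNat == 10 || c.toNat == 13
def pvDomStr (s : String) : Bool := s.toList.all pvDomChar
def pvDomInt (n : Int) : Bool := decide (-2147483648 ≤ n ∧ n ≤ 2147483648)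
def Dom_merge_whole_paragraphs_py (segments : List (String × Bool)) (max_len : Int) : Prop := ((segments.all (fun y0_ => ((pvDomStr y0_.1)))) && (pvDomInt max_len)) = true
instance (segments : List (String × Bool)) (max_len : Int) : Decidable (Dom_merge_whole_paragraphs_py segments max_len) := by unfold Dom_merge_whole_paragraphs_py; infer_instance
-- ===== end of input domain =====

-- B re-decomposes A's one stateful loop into two passes (split into whole-runs and
-- boundaries, then pack each run); objective: alternative decomposition, same cost.

-- ===== PORT A =====
-- A's single loop over segments with accumulators out (the list built so far) and
-- buf (the pending merged paragraph, None when empty), plus the final flush of buf.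
def mergeGoA (max_len : Int) : List (String × Bool) → List (String × Bool) → Option String → List (String × Bool)
  | [], out, buf =>
      match buf with
      | some b => out ++ [(b, true)]
      | none => out
  | (seg, whole) :: rest, out, buf =>
      if !whole then
        match buf with
        | some b => mergeGoA max_len rest (out ++ [(b, true)] ++ [(seg, false)]) none
        | none => mergeGoA max_len rest (out ++ [(seg, false)]) none
      else
        match buf with
        | none => mergeGoA max_len rest out (some seg)
        | some b =>
          let cand := b ++ "\n\n" ++ seg
          if PySem.Str.len cand ≤ max_len then mergeGoA max_len rest out (some cand)
          else mergeGoA max_len rest (out ++ [(b, true)]) (some seg)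

def merge_whole_paragraphs_py (segments : List (String × Bool)) (max_len : Int) : List (String × Bool) :=
  mergeGoA max_len segments [] none

-- ===== PORT B =====
-- _split_items: runs of whole paragraphs become Sum.inl (list of strings),
-- each non-whole segment a standalone Sum.inr boundary; run is the pending run.
def splitItemsB : List (String × Bool) → List String → List (Sum (List String) String)
  | [], run => if run = [] then [] else [Sum.inl run]
  | (seg, whole) :: rest, run =>
      if whole then splitItemsB rest (run ++ [seg])
      else (if run = [] then [] else [Sum.inl run]) ++ Sum.inr seg :: splitItemsB rest []

-- _pack's loop over run[1:], seeded with buf = run[0]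
def packGoB (max_len : Int) : String → List String → List (String × Bool)
  | buf, [] => [(buf, true)]
  | buf, s :: rest =>
      let cand := buf ++ "\n\n" ++ s
      if PySem.Str.len cand ≤ max_len then packGoB max_len cand rest
      else (buf, true) :: packGoB max_len s rest

def packB (max_len : Int) : List String → List (String × Bool)
  | [] => []
  | b :: rest => packGoB max_len b rest

def merge_whole_paragraphs_py_alt (segments : List (String × Bool)) (max_len : Int) : List (String × Bool) :=
  (splitItemsB segments []).foldl
    (fun out item =>
      match item with
      | Sum.inl r => out ++ packB max_len r
      | Sum.inr s => out ++ [(s, false)]) []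

-- ===== PRECONDITION & SPEC =====
def Spec_merge_whole_paragraphs_py (segments : List (String × Bool)) (max_len : Int) (out : List (String × Bool)) : Prop := out = merge_whole_paragraphs_py_alt segments max_len
instance (segments : List (String × Bool)) (max_len : Int) (out : List (String × Bool)) : Decidable (Spec_merge_whole_paragraphs_py segments max_len out) := by unfold Spec_merge_whole_paragraphs_py; infer_instance

-- ===== CLAIM (what is proved, stated in full; the proofs are below) =====
def Claim_equal_merge_whole_paragraphs_py : Prop := ∀ (segments : List (String × Bool)) (max_len : Int), Dom_merge_whole_paragraphs_py segments max_len → Spec_merge_whole_paragraphs_py segments max_len (merge_whole_paragraphs_py segments max_len)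

-- ===== LEMMAS AND PROOFS =====

-- A's loop without the out accumulator: the suffix it still produces from state buf.
def coreO (max_len : Int) : List (String × Bool) → Option String → List (String × Bool)
  | [], some b => [(b, true)]
  | [], none => []
  | (seg, whole) :: rest, buf =>
      if !whole then
        (match buf with | some b => [(b, true)] | none => []) ++ (seg, false) :: coreO max_len rest none
      else
        match buf with
        | none => coreO max_len rest (some seg)
        | some b =>
          let cand := b ++ "\n\n" ++ seg
          if PySem.Str.len cand ≤ max_len then coreO max_len rest (some cand)
          else (b, true) :: coreO max_len rest (some seg)

theorem mergeGoA_eq_coreO (max_len : Int) (segs : List (String × Bool))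
    : ∀ (out : List (String × Bool)) (buf : Option String),
      mergeGoA max_len segs out buf = out ++ coreO max_len segs buf := by
  induction segs with
  | nil => intro out buf; cases buf <;> simp [mergeGoA, coreO]
  | cons p rest ih =>
    intro out buf
    obtain ⟨seg, whole⟩ := p
    cases whole <;> cases buf
    · simp [mergeGoA, coreO, ih]
    · simp [mergeGoA, coreO, ih]
    · simp [mergeGoA, coreO, ih]
    · rename_i b
      simp only [mergeGoA, coreO, Bool.not_true]
      split
      · simp [ih]
      · simp [ih]
        split <;> simp_all

-- B's render pass as a flatMap
def gB (max_len : Int) : Sum (List String) String → List (String × Bool)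
  | Sum.inl r => packB max_len r
  | Sum.inr s => [(s, false)]

theorem renderB_eq_flatMap (max_len : Int) (items : List (Sum (List String) String))
    : ∀ out : List (String × Bool),
      items.foldl
        (fun out item =>
          match item with
          | Sum.inl r => out ++ packB max_len r
          | Sum.inr s => out ++ [(s, false)]) out = out ++ items.flatMap (gB max_len) := by
  induction items with
  | nil => intro out; simp
  | cons it rest ih =>
    intro out
    cases it <;> simp [List.foldl, ih, gB]

-- Continuation relating a partially-packed run to A's buffered loop.
def packCont (max_len : Int) : String → List String → List (String × Bool) → List (String × Bool)
  | b, [], segs => coreO max_len segs (some b)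
  | b, s :: rs, segs =>
      let cand := b ++ "\n\n" ++ s
      if PySem.Str.len cand ≤ max_len then packCont max_len cand rs segs
      else (b, true) :: packCont max_len s rs segs

theorem packCont_nil (max_len : Int) (rs : List String)
    : ∀ b, packCont max_len b rs [] = packGoB max_len b rs := by
  induction rs with
  | nil => intro b; simp [packCont, packGoB, coreO]
  | cons s rs ih =>
    intro b
    simp only [packCont, packGoB]
    split <;> rw [ih]

theorem packCont_false (max_len : Int) (rs : List String) (s : String) (rest : List (String × Bool))
    : ∀ b, packCont max_len b rs ((s, false) :: rest)
        = packGoB max_len b rs ++ (s, false) :: coreO max_len rest none := by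
  induction rs with
  | nil => intro b; simp [packCont, packGoB, coreO]
  | cons t rs ih =>
    intro b
    simp only [packCont, packGoB]
    split
    · rw [ih]
    · rw [ih]; simp

theorem packCont_snoc (max_len : Int) (rs : List String) (s : String) (rest : List (String × Bool))
    : ∀ b, packCont max_len b (rs ++ [s]) rest = packCont max_len b rs ((s, true) :: rest) := by
  induction rs with
  | nil =>
    intro b
    simp only [List.nil_append, packCont, coreO, Bool.not_true]
    split <;> rfl
  | cons t rs ih =>
    intro b
    simp only [List.cons_append, packCont]
    split
    · rw [ih]
    · rw [ih]

theorem main_bridge (max_len : Int) (segs : List (String × Bool))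
    : (∀ b rs, packCont max_len b rs segs = (splitItemsB segs (b :: rs)).flatMap (gB max_len)) ∧
      coreO max_len segs none = (splitItemsB segs []).flatMap (gB max_len) := by
  induction segs with
  | nil =>
    constructor
    · intro b rs
      simp [packCont_nil, splitItemsB, gB, packB]
    · simp [coreO, splitItemsB]
  | cons p rest ih =>
    obtain ⟨ih1, ih2⟩ := ih
    obtain ⟨seg, whole⟩ := p
    constructor
    · intro b rs
      cases whole
      · -- boundary: flush the run
        simp only [splitItemsB, if_neg (List.cons_ne_nil b rs), ite_false, Bool.false_eq_true]
        simp [packCont_false, ih2, gB, packB]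
      · -- whole: extend the run
        simp only [splitItemsB, ite_true]
        rw [List.cons_append, ← ih1 b (rs ++ [seg]), packCont_snoc]
    · cases whole
      · simp [coreO, splitItemsB, ih2, gB]
      · -- first whole paragraph of a run seeds buf
        have h := ih1 seg []
        simp only [packCont] at h
        simp [coreO, splitItemsB, h]

-- ===== VERDICT (by name: the statement is the Claim_ definition above) =====
theorem merge_whole_paragraphs_py_spec : Claim_equal_merge_whole_paragraphs_py := by
  intro segments max_len _
  unfold Spec_merge_whole_paragraphs_py merge_whole_paragraphs_py merge_whole_paragraphs_py_alt
  rw [mergeGoA_eq_coreO, renderB_eq_flatMap, (main_bridge max_len segments).2]
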